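-- pv_equiv track=rewrite | github.com/andy0013/tp2guarna | main.py | letras_por_jugador
-- ===== SOURCE A (Python) =====
-- def letras_por_jugador(jugadores):
--     """Esta funcion usa un diccionario-> diccionario-> lista para guardar las posiciones de las letras
--     de la palabra que tiene que adivinar. hay que tener en cuenta que las letras se pueden repetir y se
--     deben almacenar todas las posiciones. Realizado por Pablo Arias"""
--
--     diccionario={}
--
--     for jugador in jugadores.keys():
--
--         if jugador not in diccionario.keys():
--             diccionario[jugador]={}
--
--             palabra=jugadores[jugador][0]
--
--         for idx,letra in enumerate(palabra):
--
--             if letra not in diccionario[jugador].keys():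
--                 diccionario[jugador][letra]=[]
--
--             diccionario[jugador][letra].append(idx)
--
--     return diccionario
-- ===== SOURCE B (Python) =====
-- def letras_por_jugador(jugadores):
--     """Same mapping built by dict comprehensions: for each player, scan the word
--     once per distinct letter (first-occurrence order) collecting its positions."""
--     return {
--         jugador: {
--             letra: [i for i, c in enumerate(valores[0]) if c == letra]
--             for letra in dict.fromkeys(valores[0])
--         }
--         for jugador, valores in jugadores.items()
--     }
-- ===== Notes on version B (the rewrite author's own statement) =====
-- stated objective: idiomatic
-- what changed: Replaces A's stateful single appending pass that mutates a nested dict with nested dict comprehensions: for each player the word is rescanned once per distinct letter (dict.fromkeys order) to collect its positions.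
import Mathlib
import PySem

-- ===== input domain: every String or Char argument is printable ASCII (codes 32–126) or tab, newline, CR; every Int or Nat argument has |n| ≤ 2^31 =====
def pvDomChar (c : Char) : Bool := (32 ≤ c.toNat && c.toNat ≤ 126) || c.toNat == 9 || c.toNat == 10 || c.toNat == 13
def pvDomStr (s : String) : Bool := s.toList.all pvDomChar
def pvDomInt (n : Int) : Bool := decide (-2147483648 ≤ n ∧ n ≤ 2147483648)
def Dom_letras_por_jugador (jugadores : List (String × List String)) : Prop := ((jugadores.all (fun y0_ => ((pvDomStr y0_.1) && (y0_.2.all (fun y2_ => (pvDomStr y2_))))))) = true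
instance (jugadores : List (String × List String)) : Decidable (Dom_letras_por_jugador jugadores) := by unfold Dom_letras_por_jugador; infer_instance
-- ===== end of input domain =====

-- B rebuilds the same player→letter→positions map with nested dict comprehensions
-- (one rescan of the word per distinct letter) instead of A's stateful appending pass; objective: idiomatic.

-- ===== PORT A =====
-- body of A's inner `for idx,letra in enumerate(palabra)` loop
def pvInnerStepA (inner : PySem.Dict String (List Int)) (p : Int × Char) : PySem.Dict String (List Int) :=
  let letra := String.ofList [p.2]
  let inner := if inner.contains letra = false then inner.insert letra [] else inner
  inner.insert letra (inner.getD letra [] ++ [p.1])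

-- body of A's outer `for jugador in jugadores.keys()` loop; the state also carries `palabra`
def pvStepA (jd : PySem.Dict String (List String))
    (st : PySem.Dict String (PySem.Dict String (List Int)) × String) (jugador : String) :
    PySem.Dict String (PySem.Dict String (List Int)) × String :=
  let st1 :=
    if st.1.contains jugador = false then
      (st.1.insert jugador PySem.Dict.empty,
       -- palabra = jugadores[jugador][0]; index 0 of an empty list (IndexError) is excluded by Pre_
       (PySem.List.pyGet? (jd.getD jugador []) 0).getD "")
    else st
  let inner := (PySem.List.enumerate st1.2.toList).foldl pvInnerStepA
      (st1.1.getD jugador PySem.Dict.empty)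
  (st1.1.insert jugador inner, st1.2)

def letras_por_jugador (jugadores : List (String × List String)) : List (String × List (String × List Int)) :=
  let jd := PySem.Dict.ofList jugadores
  let fin := (PySem.Dict.keys jd).foldl (pvStepA jd) (PySem.Dict.empty, "")
  fin.1.items.map (fun p => (p.1, p.2.items))

-- ===== PORT B =====
-- inner dict comprehension: {letra: [i for i, c in enumerate(palabra) if c == letra] for letra in dict.fromkeys(palabra)}
def pvInnerB (palabra : List Char) : List (String × List Int) :=
  (PySem.List.dedup palabra).map (fun letra =>
    (String.ofList [letra],
     (PySem.List.enumerate palabra).filterMap (fun p => if p.2 = letra then some p.1 else none)))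

def letras_por_jugador_alt (jugadores : List (String × List String)) : List (String × List (String × List Int)) :=
  ((PySem.Dict.ofList jugadores).items).map (fun jv =>
    -- valores[0]; index 0 of an empty list (IndexError) is excluded by Pre_
    (jv.1, pvInnerB ((PySem.List.pyGet? jv.2 0).getD "").toList))

-- ===== PRECONDITION & SPEC =====
-- Pre_ excludes exactly the inputs on which the Python A raises IndexError: a player whose
-- word list (after Python's dict key collapsing) is empty, so that `jugadores[jugador][0]` fails.
def Pre_letras_por_jugador (jugadores : List (String × List String)) : Prop :=
  ((PySem.Dict.ofList jugadores).values.all (fun v => !v.isEmpty)) = true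
instance (jugadores : List (String × List String)) : Decidable (Pre_letras_por_jugador jugadores) := by unfold Pre_letras_por_jugador; infer_instance

def pvWitness_letras_por_jugador : (List (String × List String)) := [("ana", ["casa"]), ("luis", ["sol", "x"])]

def Spec_letras_por_jugador (jugadores : List (String × List String)) (out : List (String × List (String × List Int))) : Prop := out = letras_por_jugador_alt jugadores
instance (jugadores : List (String × List String)) (out : List (String × List (String × List Int))) : Decidable (Spec_letras_por_jugador jugadores out) := by unfold Spec_letras_por_jugador; infer_instance

-- ===== CLAIM (what is proved, stated in full; the proofs are below) =====
def Claim_equal_letras_por_jugador : Prop := ∀ (jugadores : List (String × List String)), Dom_letras_por_jugador jugadores → Pre_letras_por_jugador jugadores → Spec_letras_por_jugador jugadores (letras_por_jugador jugadores)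

-- ===== LEMMAS AND PROOFS =====

theorem pv_ofList_single_eq (a b : Char) : (String.ofList [a] = String.ofList [b]) ↔ a = b := by
  constructor
  · intro h; have := congrArg String.toList h; simpa using this
  · intro h; rw [h]

theorem pv_ofList_single_beq (a b : Char) : (String.ofList [a] == String.ofList [b]) = (a == b) := by
  rcases Decidable.em (a = b) with h | h
  · simp [h]
  · simp [h]
    intro hc; exact h ((pv_ofList_single_eq a b).1 hc)

-- A's inner-loop body is the standard grouping step d[k] = d.get(k, []) + [idx]
theorem pvInnerStepA_eq_modify (inner : PySem.Dict String (List Int)) (p : Int × Char) :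
    pvInnerStepA inner p = inner.modify (String.ofList [p.2]) [] (· ++ [p.1]) := by
  unfold pvInnerStepA PySem.Dict.modify
  dsimp only
  split_ifs with hc
  · rw [PySem.Dict.getD_insert_self, PySem.Dict.insert_insert_self,
        PySem.Dict.getD_of_not_contains inner [] hc, List.nil_append]
  · rfl

-- single-character strings compare like their characters inside a Set of keys
theorem pv_contains_map (s : List Char) (c : Char) :
    PySem.Set.contains (s.map (fun c => String.ofList [c])) (String.ofList [c])
      = PySem.Set.contains s c := by
  induction s with
  | nil => rfl
  | cons a s ih =>
      simp only [PySem.Set.contains, List.map_cons, List.contains_cons] at *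
      rw [pv_ofList_single_beq c a, ih]

-- the Set.update / injective-map commutation used to relate A's key order with dict.fromkeys
theorem pv_add_map_single (s : PySem.Set Char) (c : Char) :
    PySem.Set.add (s.map (fun c => String.ofList [c])) (String.ofList [c])
      = (PySem.Set.add s c).map (fun c => String.ofList [c]) := by
  unfold PySem.Set.add
  rw [pv_contains_map]
  rcases h : PySem.Set.contains s c with hf | ht <;> simp

theorem pv_update_map_single (cs : List Char) (s : PySem.Set Char) :
    PySem.Set.update (s.map (fun c => String.ofList [c])) (cs.map (fun c => String.ofList [c]))
      = (PySem.Set.update s cs).map (fun c => String.ofList [c]) := by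
  induction cs generalizing s with
  | nil => simp [PySem.Set.update]
  | cons c cs ih =>
      simp only [PySem.Set.update, List.map_cons, List.foldl_cons] at *
      rw [pv_add_map_single, ih]

-- filter-then-project over the relabelled enumerate list is B's comprehension
theorem pv_filter_map_comp (l : List (Int × Char)) (letra : Char) :
    List.map (fun x => x.2) (List.filter (fun p => p.1 == String.ofList [letra])
        (l.map (fun p => (String.ofList [p.2], p.1))))
      = l.filterMap (fun p => if p.2 = letra then some p.1 else none) := by
  induction l with
  | nil => rfl
  | cons p l ih =>
      simp only [List.map_cons, List.filter_cons, List.filterMap_cons, pv_ofList_single_beq]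
      rcases Decidable.em (p.2 = letra) with h | h
      · simp [h, ih]
      · simp [h, ih]

-- A's inner loop over one word produces exactly B's inner comprehension (as items)
theorem pv_inner_items (cs : List Char) :
    ((PySem.List.enumerate cs).foldl pvInnerStepA PySem.Dict.empty).items = pvInnerB cs := by
  have hstep : ((PySem.List.enumerate cs).foldl pvInnerStepA PySem.Dict.empty)
      = ((PySem.List.enumerate cs).map (fun p => (String.ofList [p.2], p.1))).foldl
          (fun d p => d.modify p.1 [] (· ++ [p.2])) PySem.Dict.empty := by
    rw [List.foldl_map]
    exact PySem.List.foldl_congr_mem _ _ _ _ (fun d p _ => pvInnerStepA_eq_modify d p)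
  rw [hstep]
  set l := (PySem.List.enumerate cs).map (fun p => (String.ofList [p.2], p.1)) with hl
  have hnd : (l.foldl (fun d p => d.modify p.1 [] (· ++ [p.2])) PySem.Dict.empty).keys.Nodup :=
    PySem.Dict.nodup_keys_foldl_modify_key l Prod.fst [] (fun _ p v => v ++ [p.2])
      PySem.Dict.empty PySem.Dict.nodup_keys_empty
  rw [PySem.Dict.items_eq_map_keys _ hnd []]
  have hkeys : (l.foldl (fun d p => d.modify p.1 [] (· ++ [p.2])) PySem.Dict.empty).keys
      = (PySem.List.dedup cs).map (fun c => String.ofList [c]) := by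
    rw [PySem.Dict.keys_foldl_modify_key l Prod.fst [] (fun _ p v => v ++ [p.2]) PySem.Dict.empty]
    have hmap : l.map Prod.fst = cs.map (fun c => String.ofList [c]) := by
      rw [hl, List.map_map]
      have := PySem.List.map_snd_enumerate cs 0
      calc (PySem.List.enumerate cs 0).map (Prod.fst ∘ fun p => (String.ofList [p.2], p.1))
          = ((PySem.List.enumerate cs 0).map (fun p => p.2)).map (fun c => String.ofList [c]) := by
            rw [List.map_map]; rfl
        _ = cs.map (fun c => String.ofList [c]) := by rw [this]
    rw [hmap]
    have hempty : (PySem.Dict.empty : PySem.Dict String (PySem.Dict String (List Int))).keys = [] := rfl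
    have h2 := pv_update_map_single cs []
    simp only [List.map_nil] at h2
    calc PySem.Set.update (PySem.Dict.empty : PySem.Dict String (List Int)).keys
            (cs.map (fun c => String.ofList [c]))
        = PySem.Set.update ([] : PySem.Set String) (cs.map (fun c => String.ofList [c])) := rfl
      _ = (PySem.Set.update ([] : PySem.Set Char) cs).map (fun c => String.ofList [c]) := h2
      _ = (PySem.List.dedup cs).map (fun c => String.ofList [c]) := by
            rw [show PySem.Set.update ([] : PySem.Set Char) cs = PySem.Set.ofList cs from
                  (PySem.Set.ofList_eq_foldl cs).symm]
            simp
  rw [hkeys, List.map_map]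
  unfold pvInnerB
  refine List.map_congr_left (fun letra _ => ?_)
  simp only [Function.comp]
  congr 1
  rw [PySem.Dict.getD_foldl_modify_append l PySem.Dict.empty (String.ofList [letra])]
  have hempty : (PySem.Dict.empty : PySem.Dict String (List Int)).getD (String.ofList [letra]) [] = [] :=
    PySem.Dict.getD_empty _ _
  rw [hempty, List.nil_append, hl, pv_filter_map_comp]

-- A's outer loop over fresh keys appends one entry per key
theorem pv_outer (jd : PySem.Dict String (List String)) (ks : List String)
    (st : PySem.Dict String (PySem.Dict String (List Int)) × String)
    (hnd : ks.Nodup) (hfresh : ∀ k ∈ ks, st.1.contains k = false) :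
    (ks.foldl (pvStepA jd) st).1.items
      = st.1.items ++ ks.map (fun k =>
          (k, (PySem.List.enumerate (((PySem.List.pyGet? (jd.getD k []) 0).getD "").toList)).foldl
                pvInnerStepA PySem.Dict.empty)) := by
  induction ks generalizing st with
  | nil => simp
  | cons k ks ih =>
      have hk : st.1.contains k = false := hfresh k (by simp)
      have hstep : pvStepA jd st k
          = (st.1.insert k ((PySem.List.enumerate
                (((PySem.List.pyGet? (jd.getD k []) 0).getD "").toList)).foldl
                pvInnerStepA PySem.Dict.empty),
             (PySem.List.pyGet? (jd.getD k []) 0).getD "") := by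
        unfold pvStepA
        dsimp only
        rw [if_pos hk]
        dsimp only
        rw [PySem.Dict.getD_insert_self, PySem.Dict.insert_insert_self]
      rw [List.foldl_cons, hstep, ih _ (List.Nodup.of_cons hnd) ?_]
      · rw [PySem.Dict.items_insert_of_not_contains st.1 _ hk]
        simp
      · intro k' hk'
        rw [PySem.Dict.contains_insert]
        have hne : k' ≠ k := by
          rintro rfl
          exact (List.nodup_cons.1 hnd).1 hk'
        simp [hne, hfresh k' (List.mem_cons_of_mem _ hk')]

-- ===== VERDICT (by name: the statement is the Claim_ definition above) =====
theorem letras_por_jugador_spec : Claim_equal_letras_por_jugador := by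
  intro jugadores _ _
  unfold Spec_letras_por_jugador letras_por_jugador letras_por_jugador_alt
  dsimp only
  set jd := PySem.Dict.ofList jugadores with hjd
  have hnd : jd.keys.Nodup := PySem.Dict.nodup_keys_ofList jugadores
  rw [pv_outer jd jd.keys (PySem.Dict.empty, "") hnd
        (fun k _ => PySem.Dict.contains_empty k)]
  rw [PySem.Dict.items_eq_map_keys jd hnd []]
  have hempty : (PySem.Dict.empty : PySem.Dict String (PySem.Dict String (List Int))).items = [] := rfl
  rw [hempty, List.nil_append]
  simp only [List.map_map]
  refine List.map_congr_left (fun k _ => ?_)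
  simp only [Function.comp]
  rw [pv_inner_items]
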